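-- pv_equiv track=rewrite | github.com/cirosantilli/project-euler-solutions | lint.py | c_comment_hits
-- ===== SOURCE A (Python) =====
-- def c_comment_hits(text: str, answer: str) -> list[int]:
--     hits: list[int] = []
--     in_block = False
--     for idx, line in enumerate(text.splitlines(), 1):
--         if in_block:
--             if answer in line:
--                 hits.append(idx)
--             if "*/" in line:
--                 in_block = False
--             continue
--         if "/*" in line:
--             in_block = True
--             if answer in line:
--                 hits.append(idx)
--             if "*/" in line:
--                 in_block = False
--             continue
--         if "//" in line:
--             if answer in line.split("//", 1)[1]:
--                 hits.append(idx)
--     return hits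
-- ===== SOURCE B (Python) =====
-- def c_comment_hits(text: str, answer: str) -> list[int]:
--     # Pass 1: map every line to the comment text that should be searched
--     # (the whole line inside /* */ blocks, the part after // otherwise, None if no comment),
--     # running the block state machine.
--     comments: list = []
--     in_block = False
--     for line in text.splitlines():
--         if in_block or "/*" in line:
--             comments.append(line)
--             if "/*" in line:
--                 in_block = True
--             if "*/" in line:
--                 in_block = False
--         elif "//" in line:
--             comments.append(line.split("//", 1)[1])
--         else:
--             comments.append(None)
--     # Pass 2: the hits are just the 1-based positions whose comment text contains the answer.
--     return [idx for idx, c in enumerate(comments, 1) if c is not None and answer in c]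
-- ===== Notes on version B (the rewrite author's own statement) =====
-- stated objective: alternative
-- what changed: A's single stateful loop that appends hits inline is decomposed into a pass that maps each line to its searchable comment text (whole line in a block, part after //, or None) and a comprehension that collects the 1-based indices whose comment text contains the answer.
import Mathlib
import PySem

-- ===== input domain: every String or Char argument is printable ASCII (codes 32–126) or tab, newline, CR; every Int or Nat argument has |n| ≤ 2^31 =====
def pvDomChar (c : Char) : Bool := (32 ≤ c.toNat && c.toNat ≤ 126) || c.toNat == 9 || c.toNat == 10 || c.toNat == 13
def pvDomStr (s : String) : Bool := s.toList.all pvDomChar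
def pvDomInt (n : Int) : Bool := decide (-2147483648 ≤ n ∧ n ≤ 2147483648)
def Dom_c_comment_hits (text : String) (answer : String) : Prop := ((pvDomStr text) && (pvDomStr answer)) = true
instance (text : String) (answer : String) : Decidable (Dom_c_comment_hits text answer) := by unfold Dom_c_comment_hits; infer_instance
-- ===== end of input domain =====

-- B replaces A's single stateful collecting loop by a pass mapping each line to its searchable
-- comment text (or none) plus a comprehension over those texts; alternative decomposition, same cost.

-- ===== PORT A =====
-- one iteration of A's loop: state is (hits, in_block), input is (idx, line)
def aStep (answer : String) (st : List Int × Bool) (p : Int × String) : List Int × Bool :=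
  if st.2 then
    ((if PySem.Str.isIn answer p.2 then st.1 ++ [p.1] else st.1),
     (if PySem.Str.isIn "*/" p.2 then false else st.2))
  else if PySem.Str.isIn "/*" p.2 then
    ((if PySem.Str.isIn answer p.2 then st.1 ++ [p.1] else st.1),
     (if PySem.Str.isIn "*/" p.2 then false else true))
  else if PySem.Str.isIn "//" p.2 then
    ((if PySem.Str.isIn answer (((PySem.Str.splitMax? p.2 "//" 1).getD []).getD 1 "")
       then st.1 ++ [p.1] else st.1), st.2)
  else st

def c_comment_hits (text : String) (answer : String) : List Int :=
  ((PySem.List.enumerate (PySem.Str.splitlines text) 1).foldl (aStep answer) ([], false)).1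

-- ===== PORT B =====
-- pass 1 of Source B: append the comment text of one line (none = no comment), updating the block state
def bCommentStep (st : List (Option String) × Bool) (line : String) : List (Option String) × Bool :=
  if st.2 || PySem.Str.isIn "/*" line then
    (st.1 ++ [some line],
     let ib := if PySem.Str.isIn "/*" line then true else st.2
     if PySem.Str.isIn "*/" line then false else ib)
  else if PySem.Str.isIn "//" line then
    (st.1 ++ [some (((PySem.Str.splitMax? line "//" 1).getD []).getD 1 "")], st.2)
  else (st.1 ++ [none], st.2)

def c_comment_hits_alt (text : String) (answer : String) : List Int :=
  let comments := ((PySem.Str.splitlines text).foldl bCommentStep ([], false)).1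
  -- pass 2 of Source B: the comprehension, as a filterMap over enumerate(comments, 1)
  (PySem.List.enumerate comments 1).filterMap (fun p =>
    match p.2 with
    | some c => if PySem.Str.isIn answer c then some p.1 else none
    | none => none)

-- ===== PRECONDITION & SPEC =====
def Spec_c_comment_hits (text : String) (answer : String) (out : List Int) : Prop := out = c_comment_hits_alt text answer
instance (text : String) (answer : String) (out : List Int) : Decidable (Spec_c_comment_hits text answer out) := by unfold Spec_c_comment_hits; infer_instance

-- ===== CLAIM (what is proved, stated in full; the proofs are below) =====
def Claim_equal_c_comment_hits : Prop := ∀ (text : String) (answer : String), Dom_c_comment_hits text answer → Spec_c_comment_hits text answer (c_comment_hits text answer)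

-- ===== LEMMAS AND PROOFS =====

-- proof-only helpers: the comment text of one line and the next block state
def commentOf (b : Bool) (line : String) : Option String :=
  if b || PySem.Str.isIn "/*" line then some line
  else if PySem.Str.isIn "//" line then
    some (((PySem.Str.splitMax? line "//" 1).getD []).getD 1 "")
  else none

def nb (b : Bool) (line : String) : Bool :=
  if b || PySem.Str.isIn "/*" line then
    if PySem.Str.isIn "*/" line then false
    else if PySem.Str.isIn "/*" line then true else b
  else b

def commentsRec (b : Bool) : List String → List (Option String)
  | [] => []
  | l :: ls => commentOf b l :: commentsRec (nb b l) ls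

def hitFn (answer : String) (p : Int × Option String) : Option Int :=
  match p.2 with
  | some c => if PySem.Str.isIn answer c then some p.1 else none
  | none => none

theorem bCommentStep_eq (cs : List (Option String)) (b : Bool) (l : String) :
    bCommentStep (cs, b) l = (cs ++ [commentOf b l], nb b l) := by
  simp only [bCommentStep, commentOf, nb]
  split_ifs <;> simp_all

theorem comments_eq (ls : List String) : ∀ (cs : List (Option String)) (b : Bool),
    (ls.foldl bCommentStep (cs, b)).1 = cs ++ commentsRec b ls := by
  induction ls with
  | nil => intro cs b; simp [commentsRec]
  | cons l ls ih =>
      intro cs b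
      simp only [List.foldl_cons, bCommentStep_eq, ih, commentsRec, List.append_assoc,
        List.singleton_append]

theorem aStep_snd (answer : String) (hits : List Int) (b : Bool) (idx : Int) (l : String) :
    (aStep answer (hits, b) (idx, l)).2 = nb b l := by
  cases b <;> simp only [aStep, nb] <;> split_ifs <;> simp_all

theorem aStep_fst (answer : String) (hits : List Int) (b : Bool) (idx : Int) (l : String) :
    (aStep answer (hits, b) (idx, l)).1
      = hits ++ List.filterMap (hitFn answer) [(idx, commentOf b l)] := by
  cases b <;> simp only [aStep, commentOf, hitFn, List.filterMap] <;> split_ifs <;> simp_all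

theorem main_lemma (answer : String) (ls : List String) :
    ∀ (b : Bool) (idx : Int) (hits : List Int),
    ((PySem.List.enumerate ls idx).foldl (aStep answer) (hits, b)).1
      = hits ++ (PySem.List.enumerate (commentsRec b ls) idx).filterMap (hitFn answer) := by
  induction ls with
  | nil => intro b idx hits; simp [commentsRec, PySem.List.enumerate_nil]
  | cons l ls ih =>
      intro b idx hits
      rw [PySem.List.enumerate_cons, List.foldl_cons]
      have hpair : aStep answer (hits, b) (idx, l)
          = (hits ++ List.filterMap (hitFn answer) [(idx, commentOf b l)], nb b l) := by
        rw [← aStep_fst, ← aStep_snd answer hits b idx l]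
      rw [hpair, ih]
      simp only [commentsRec, PySem.List.enumerate_cons]
      rw [show ((idx, commentOf b l) :: PySem.List.enumerate (commentsRec (nb b l) ls) (idx + 1))
            = [(idx, commentOf b l)] ++ PySem.List.enumerate (commentsRec (nb b l) ls) (idx + 1)
          from rfl, List.filterMap_append, List.append_assoc]

-- ===== VERDICT (by name: the statement is the Claim_ definition above) =====
theorem c_comment_hits_spec : Claim_equal_c_comment_hits := by
  intro text answer _
  unfold Spec_c_comment_hits c_comment_hits c_comment_hits_alt
  simp only [comments_eq, List.nil_append]
  exact main_lemma answer (PySem.Str.splitlines text) false 1 []
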